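-- pv_equiv track=rewrite | github.com/zolfaShefreie/MusicSearchEngine-MIR | mir_sys/management/commands/add_fingerprints.py | get_all_rel_fingerprints
-- ===== SOURCE A (Python) =====
-- import itertools
--
-- def get_all_rel_fingerprints(num_binary: str, max_hamming_distance=2):
--     rel_fingerprints = set()
--
--     for i in range(1, max_hamming_distance+1):
--         for each in itertools.combinations(range(len(num_binary)), i):
--             new = str().join([str(0**int(num_binary[i])) if i in each else num_binary[i]
--                               for i in range(len(num_binary))])
--             rel_fingerprints.add(new)
--     return list(rel_fingerprints)
-- ===== SOURCE B (Python) =====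
-- def get_all_rel_fingerprints(num_binary: str, max_hamming_distance=2):
--     out = set()
--
--     def go(i, budget, used, acc):
--         if i == len(num_binary):
--             if used:
--                 out.add(acc)
--             return
--         c = num_binary[i]
--         go(i + 1, budget, used, acc + c)
--         if budget > 0:
--             go(i + 1, budget - 1, True, acc + str(0**int(c)))
--
--     go(0, max_hamming_distance, False, "")
--     return sorted(out)
-- ===== Notes on version B (the rewrite author's own statement) =====
-- stated objective: alternative
-- what changed: Replaces the itertools.combinations double loop (materialise every index subset of size 1..k, then rebuild the whole string per subset) by a single recursive pass over the string with a remaining flip budget that builds each variant incrementally, collected into a set and returned sorted (the set's iteration order is hash-arbitrary, so outputs are compared as sets).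
import Mathlib
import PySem

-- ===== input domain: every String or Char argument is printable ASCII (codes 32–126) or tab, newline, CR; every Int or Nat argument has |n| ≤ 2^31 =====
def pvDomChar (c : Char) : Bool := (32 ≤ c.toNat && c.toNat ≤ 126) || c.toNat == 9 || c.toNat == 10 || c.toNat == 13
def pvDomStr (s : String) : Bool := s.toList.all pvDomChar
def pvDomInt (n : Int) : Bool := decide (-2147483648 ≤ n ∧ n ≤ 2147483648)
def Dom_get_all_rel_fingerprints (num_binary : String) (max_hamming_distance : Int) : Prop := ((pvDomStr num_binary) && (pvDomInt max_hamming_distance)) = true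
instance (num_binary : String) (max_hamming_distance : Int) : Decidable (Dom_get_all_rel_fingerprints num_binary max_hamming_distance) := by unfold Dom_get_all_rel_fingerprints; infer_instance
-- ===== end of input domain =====

-- B replaces A's itertools.combinations double loop by one recursive pass with a flip budget and
-- returns the set sorted (alternative decomposition; Python's set iteration order is hash-arbitrary
-- and this task's outputs are compared as finite sets, so both ports emit the set in sorted order).

-- ===== PORT A =====
-- str(0**int(c)) for a one-character string c; int() raising ValueError (ofChars? = none) is
-- excluded by Pre_, where the exponent is a digit value 0..9, so modelling ** with toNat is exact.
def pvFlip (c : Char) : List Char :=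
  PySem.Int.toChars ((0 : Int) ^ ((PySem.Int.ofChars? [c]).getD 0).toNat)

-- str().join([str(0**int(num_binary[i])) if i in each else num_binary[i] for i in range(len(num_binary))])
-- (strings are modelled on toList, so join/indexing are the Chars-level primitives; exact)
def pvMaskA (cs : List Char) (each : List Int) : List Char :=
  PySem.Chars.join []
    ((PySem.List.pyRange 0 (cs.length : Int) 1).map
      (fun i => if i ∈ each then pvFlip (PySem.List.pyGetD cs i ' ')
                else [PySem.List.pyGetD cs i ' ']))

def get_all_rel_fingerprints (num_binary : String) (max_hamming_distance : Int) : List String :=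
  -- for i in range(1, max_hamming_distance+1): for each in itertools.combinations(range(len(num_binary)), i): rel.add(new)
  -- (i ≥ 1 inside the loop, so the Nat argument i.toNat of combinations is exactly Python's i)
  -- list(rel_fingerprints): Python's set iteration order is hash-seed-arbitrary and not modelled;
  -- the port returns the set's elements sorted (this task's outputs are compared as finite sets).
  PySem.List.sorted
    ((PySem.List.pyRange 1 (max_hamming_distance + 1) 1).foldl
      (fun rel i =>
        (PySem.List.combinations (PySem.List.pyRange 0 (num_binary.toList.length : Int) 1) i.toNat).foldl
          (fun rel each => PySem.Set.add rel (String.ofList (pvMaskA num_binary.toList each))) rel)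
      PySem.Set.empty)
    (fun x => x)

-- ===== PORT B =====
-- def go(i, budget, used, acc): recursion over the suffix num_binary[i:] (same state, i ↔ rest)
def pvGoB (rest : List Char) (budget : Int) (used : Bool) (acc : List Char)
    (out : PySem.Set String) : PySem.Set String :=
  match rest with
  | [] => if used then PySem.Set.add out (String.ofList acc) else out
  | c :: rs =>
    let out1 := pvGoB rs budget used (acc ++ [c]) out
    if budget > 0 then pvGoB rs (budget - 1) true (acc ++ pvFlip c) out1 else out1

def get_all_rel_fingerprints_alt (num_binary : String) (max_hamming_distance : Int) : List String :=
  PySem.List.sorted (pvGoB num_binary.toList max_hamming_distance false [] PySem.Set.empty)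
    (fun x => x)

-- ===== PRECONDITION & SPEC =====
-- Pre_ excludes exactly the inputs where Python A raises ValueError: a non-empty string containing a
-- non-digit character while max_hamming_distance ≥ 1 reaches int() on that character.
def Pre_get_all_rel_fingerprints (num_binary : String) (max_hamming_distance : Int) : Prop :=
  num_binary.toList = [] ∨ max_hamming_distance ≤ 0 ∨ PySem.Str.strIsdigit num_binary = true

instance (num_binary : String) (max_hamming_distance : Int) : Decidable (Pre_get_all_rel_fingerprints num_binary max_hamming_distance) := by unfold Pre_get_all_rel_fingerprints; infer_instance

def pvWitness_get_all_rel_fingerprints : String × Int := ("0101", 2)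

def Spec_get_all_rel_fingerprints (num_binary : String) (max_hamming_distance : Int) (out : List String) : Prop := out = get_all_rel_fingerprints_alt num_binary max_hamming_distance
instance (num_binary : String) (max_hamming_distance : Int) (out : List String) : Decidable (Spec_get_all_rel_fingerprints num_binary max_hamming_distance out) := by unfold Spec_get_all_rel_fingerprints; infer_instance

-- ===== CLAIM (what is proved, stated in full; the proofs are below) =====
def Claim_equal_get_all_rel_fingerprints : Prop := ∀ (num_binary : String) (max_hamming_distance : Int), Dom_get_all_rel_fingerprints num_binary max_hamming_distance → Pre_get_all_rel_fingerprints num_binary max_hamming_distance → Spec_get_all_rel_fingerprints num_binary max_hamming_distance (get_all_rel_fingerprints num_binary max_hamming_distance)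

-- ===== LEMMAS AND PROOFS =====

-- the common shape of one variant: per position keep [c] or use pvFlip c, concatenated
def pvMask (cs : List Char) (bs : List Bool) : List Char :=
  match cs, bs with
  | [], _ => []
  | _, [] => []
  | c :: cs, b :: bs => (if b then pvFlip c else [c]) ++ pvMask cs bs

-- the set both programs compute: some positions flipped, at least 1 and at most k of them
def pvQ (cs : List Char) (k : Int) (t : String) : Prop :=
  ∃ bs : List Bool, bs.length = cs.length ∧ 1 ≤ bs.count true ∧
    (bs.count true : Int) ≤ k ∧ t = String.ofList (pvMask cs bs)

theorem pv_mem_foldl_add {α β : Type} [BEq α] [LawfulBEq α] (l : List β) (f : β → α)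
    (s0 : PySem.Set α) (t : α) :
    t ∈ l.foldl (fun s x => PySem.Set.add s (f x)) s0 ↔ t ∈ s0 ∨ ∃ x ∈ l, t = f x := by
  induction l generalizing s0 with
  | nil => simp
  | cons x xs ih =>
    simp only [List.foldl_cons, ih, PySem.Set.mem_add, List.mem_cons]
    constructor
    · rintro ((h | h) | ⟨y, hy, rfl⟩)
      · exact Or.inl h
      · exact Or.inr ⟨x, Or.inl rfl, h⟩
      · exact Or.inr ⟨y, Or.inr hy, rfl⟩
    · rintro (h | ⟨y, (rfl | hy), rfl⟩)
      · exact Or.inl (Or.inl h)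
      · exact Or.inl (Or.inr rfl)
      · exact Or.inr ⟨y, hy, rfl⟩

theorem pv_nodup_foldl_add {α β : Type} [BEq α] [LawfulBEq α] (l : List β) (f : β → α)
    (s0 : PySem.Set α) (h : s0.Nodup) :
    (l.foldl (fun s x => PySem.Set.add s (f x)) s0).Nodup := by
  induction l generalizing s0 with
  | nil => exact h
  | cons x xs ih => exact ih _ (PySem.Set.nodup_add _ _ h)

theorem pv_mem_foldl2 {α β γ : Type} [BEq α] [LawfulBEq α] (l : List β) (g : β → List γ)
    (f : γ → α) (s0 : PySem.Set α) (t : α) :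
    t ∈ l.foldl (fun s i => (g i).foldl (fun s e => PySem.Set.add s (f e)) s) s0 ↔
      t ∈ s0 ∨ ∃ i ∈ l, ∃ e ∈ g i, t = f e := by
  induction l generalizing s0 with
  | nil => simp
  | cons x xs ih =>
    simp only [List.foldl_cons, ih, pv_mem_foldl_add, List.mem_cons]
    constructor
    · rintro ((h | ⟨e, he, rfl⟩) | ⟨i, hi, e, he, rfl⟩)
      · exact Or.inl h
      · exact Or.inr ⟨x, Or.inl rfl, e, he, rfl⟩
      · exact Or.inr ⟨i, Or.inr hi, e, he, rfl⟩
    · rintro (h | ⟨i, (rfl | hi), e, he, rfl⟩)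
      · exact Or.inl (Or.inl h)
      · exact Or.inl (Or.inr ⟨e, he, rfl⟩)
      · exact Or.inr ⟨i, hi, e, he, rfl⟩

theorem pv_nodup_foldl2 {α β γ : Type} [BEq α] [LawfulBEq α] (l : List β) (g : β → List γ)
    (f : γ → α) (s0 : PySem.Set α) (h : s0.Nodup) :
    (l.foldl (fun s i => (g i).foldl (fun s e => PySem.Set.add s (f e)) s) s0).Nodup := by
  induction l generalizing s0 with
  | nil => exact h
  | cons x xs ih => exact ih _ (pv_nodup_foldl_add _ _ _ h)

theorem pv_join_nil (xss : List (List Char)) : PySem.Chars.join [] xss = xss.flatten := by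
  simp only [PySem.Chars.join, List.intercalate]
  induction xss with
  | nil => rfl
  | cons x xs ih =>
    cases xs with
    | nil => simp
    | cons y ys => simpa using ih

theorem pv_filter_sublist {α : Type} [DecidableEq α] {l₁ l₂ : List α} (h : l₁.Sublist l₂)
    (hn : l₂.Nodup) : l₂.filter (fun x => decide (x ∈ l₁)) = l₁ := by
  induction h with
  | slnil => rfl
  | @cons l₁ l₂ a h ih =>
    rw [List.filter_cons]
    have ha : a ∉ l₁ := fun hm => (List.nodup_cons.mp hn).1 (h.subset hm)
    simp only [ha, decide_false, Bool.false_eq_true, if_false]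
    exact ih (List.nodup_cons.mp hn).2
  | @cons₂ l₁ l₂ a h ih =>
    rw [List.filter_cons]
    have ha : a ∉ l₂ := (List.nodup_cons.mp hn).1
    simp only [List.mem_cons, true_or, decide_true, if_pos]
    have he : List.filter (fun x => decide (x = a ∨ x ∈ l₁)) l₂
        = List.filter (fun x => decide (x ∈ l₁)) l₂ := by
      apply List.filter_congr
      intro x hx
      have hne : x ≠ a := fun heq => ha (heq ▸ hx)
      simp [hne]
    rw [he, ih (List.nodup_cons.mp hn).2]

theorem pv_pyRange0 (n : Nat) :
    PySem.List.pyRange 0 (n : Int) 1 = List.map Int.ofNat (List.range n) := by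
  rw [PySem.List.pyRange_one]
  simp only [sub_zero, Int.toNat_natCast]
  apply List.map_congr_left
  intro j _
  simp

theorem pv_getD_range (bs : List Bool) (n : Nat) (h : bs.length = n) :
    (List.range n).map (fun j => bs.getD j false) = bs := by
  apply List.ext_getElem
  · simp [h]
  · intro j h1 h2
    simp [List.getD_eq_getElem?_getD, List.getElem?_eq_getElem h2]

theorem pv_countP_getD (bs : List Bool) :
    (List.range bs.length).countP (fun j => bs.getD j false) = bs.count true := by
  induction bs with
  | nil => rfl
  | cons b bs ih =>
    rw [List.length_cons, List.range_succ_eq_map, List.countP_cons, List.countP_map]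
    have hc : ((fun j => (b :: bs).getD j false) ∘ Nat.succ) = fun j => bs.getD j false := by
      funext j
      simp
    rw [hc, ih, List.count_cons]
    cases b <;> simp

theorem pv_count_map_range (P : Nat → Bool) (n : Nat) :
    ((List.range n).map P).count true = (List.range n).countP P := by
  rw [List.count, List.countP_map]
  apply List.countP_congr
  intro j _
  simp

theorem pv_maskA_bridge (cs : List Char) (P : Nat → Bool) :
    ((List.range cs.length).map
        (fun j => if P j then pvFlip (cs.getD j ' ') else [cs.getD j ' '])).flatten
      = pvMask cs ((List.range cs.length).map P) := by
  induction cs generalizing P with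
  | nil => rfl
  | cons c cs ih =>
    rw [List.length_cons, List.range_succ_eq_map, List.map_cons, List.map_cons,
      List.flatten_cons, List.map_map, List.map_map]
    have hf : (fun j => if P j then pvFlip ((c :: cs).getD j ' ') else [(c :: cs).getD j ' ']) ∘
        Nat.succ = fun j => if P (j + 1) then pvFlip (cs.getD j ' ') else [cs.getD j ' '] := by
      funext j
      simp [Function.comp]
    have hP : (P ∘ Nat.succ) = fun j => P (j + 1) := by
      funext j
      simp [Function.comp]
    rw [hf, hP, ih (fun j => P (j + 1))]
    simp [pvMask]

theorem pv_maskA_eq (cs : List Char) (each : List Int) :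
    pvMaskA cs each
      = pvMask cs ((List.range cs.length).map (fun j : Nat => decide ((j : Int) ∈ each))) := by
  unfold pvMaskA
  rw [pv_join_nil, pv_pyRange0, List.map_map]
  have hb := pv_maskA_bridge cs (fun j : Nat => decide ((j : Int) ∈ each))
  simp only [decide_eq_true_eq] at hb
  rw [← hb]
  congr 1
  apply List.map_congr_left
  intro j _
  simp only [Function.comp, PySem.List.pyGetD_natCast, Int.ofNat_eq_natCast]

theorem pv_relA_iff_Q (cs : List Char) (k : Int) (t : String) :
    (∃ i ∈ PySem.List.pyRange 1 (k + 1) 1,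
        ∃ each ∈ PySem.List.combinations (PySem.List.pyRange 0 (cs.length : Int) 1) i.toNat,
          t = String.ofList (pvMaskA cs each)) ↔ pvQ cs k t := by
  have hRnodup : (PySem.List.pyRange 0 (cs.length : Int) 1).Nodup := by
    rw [pv_pyRange0]
    exact (List.nodup_range).map (fun a b h => by simpa using h)
  constructor
  · rintro ⟨i, hi, each, he, rfl⟩
    rw [PySem.List.mem_pyRange_one] at hi
    obtain ⟨hsub, hlenE⟩ := (PySem.List.mem_combinations_iff _ _ _).mp he
    have hfilter := pv_filter_sublist hsub hRnodup
    have hcount : ((List.range cs.length).map (fun j : Nat => decide ((j : Int) ∈ each))).count true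
        = each.length := by
      conv_rhs => rw [← hfilter, pv_pyRange0, List.filter_map, List.length_map,
        ← List.countP_eq_length_filter]
      rw [pv_count_map_range]
      apply List.countP_congr
      intro j _
      simp
    refine ⟨(List.range cs.length).map (fun j : Nat => decide ((j : Int) ∈ each)), by simp, ?_, ?_, ?_⟩
    · rw [hcount, hlenE]; omega
    · rw [hcount, hlenE]; omega
    · rw [pv_maskA_eq]
  · rintro ⟨bs, hlen, h1, h2, rfl⟩
    refine ⟨(bs.count true : Int), ?_,
      List.map Int.ofNat ((List.range cs.length).filter (fun j => bs.getD j false)), ?_, ?_⟩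
    · rw [PySem.List.mem_pyRange_one]
      constructor <;> omega
    · rw [PySem.List.mem_combinations_iff]
      constructor
      · rw [pv_pyRange0]
        exact List.Sublist.map Int.ofNat List.filter_sublist
      · rw [List.length_map, ← List.countP_eq_length_filter, ← hlen, pv_countP_getD]
        omega
    · rw [pv_maskA_eq]
      congr 2
      have hmem : ∀ j ∈ List.range cs.length,
          decide ((j : Int) ∈ List.map Int.ofNat ((List.range cs.length).filter
            (fun j => bs.getD j false))) = bs.getD j false := by
        intro j hj
        have : ((j : Int) ∈ List.map Int.ofNat ((List.range cs.length).filter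
            (fun j => bs.getD j false))) ↔ bs.getD j false = true := by
          simp only [List.mem_map, List.mem_filter, List.mem_range]
          constructor
          · rintro ⟨x, ⟨_, hx⟩, hxe⟩
            have hxj : x = j := by simpa using hxe
            exact hxj ▸ hx
          · intro hP
            exact ⟨j, ⟨List.mem_range.mp hj, hP⟩, rfl⟩
        by_cases hX : ((j : Int) ∈ List.map Int.ofNat ((List.range cs.length).filter
            (fun j => bs.getD j false)))
        · rw [decide_eq_true hX, this.mp hX]
        · rw [decide_eq_false hX]
          cases hP : bs.getD j false with
          | false => rfl
          | true => exact absurd (this.mpr hP) hX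
      rw [List.map_congr_left hmem, pv_getD_range bs _ hlen]

theorem pv_mem_goB (rest : List Char) (b : Int) (used : Bool) (acc : List Char)
    (out : PySem.Set String) (t : String) :
    t ∈ pvGoB rest b used acc out ↔
      t ∈ out ∨ ∃ bs : List Bool, bs.length = rest.length ∧
        (used = true ∨ 1 ≤ bs.count true) ∧ ((bs.count true : Int) ≤ b ∨ bs.count true = 0) ∧
        t = String.ofList (acc ++ pvMask rest bs) := by
  induction rest generalizing b used acc out with
  | nil =>
    cases used with
    | false =>
      have e : pvGoB [] b false acc out = out := rfl
      rw [e]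
      constructor
      · exact Or.inl
      · rintro (h | ⟨bs, hlen, (h1 | h1), _, rfl⟩)
        · exact h
        · exact absurd h1 (by simp)
        · obtain rfl : bs = [] := by simpa using hlen
          simp at h1
    | true =>
      have e : pvGoB [] b true acc out = out.add (String.ofList acc) := rfl
      rw [e, PySem.Set.mem_add]
      constructor
      · rintro (h | rfl)
        · exact Or.inl h
        · exact Or.inr ⟨[], rfl, Or.inl rfl, Or.inr rfl, by simp [pvMask]⟩
      · rintro (h | ⟨bs, hlen, _, _, rfl⟩)
        · exact Or.inl h
        · obtain rfl : bs = [] := by simpa using hlen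
          exact Or.inr (by simp [pvMask])
  | cons c rs ih =>
    have hmask : ∀ (b0 : Bool) (bs : List Bool),
        pvMask (c :: rs) (b0 :: bs) = (if b0 then pvFlip c else [c]) ++ pvMask rs bs :=
      fun _ _ => rfl
    by_cases hb : b > 0
    · simp only [pvGoB, if_pos hb]
      rw [ih, ih]
      constructor
      · rintro ((h | ⟨bs, hlen, h1, h2, rfl⟩) | ⟨bs, hlen, _, h2, rfl⟩)
        · exact Or.inl h
        · refine Or.inr ⟨false :: bs, by simp [hlen], ?_, ?_, ?_⟩
          · simpa using h1
          · simpa using h2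
          · rw [hmask]; simp
        · refine Or.inr ⟨true :: bs, by simp [hlen], Or.inr (by simp), ?_, ?_⟩
          · left
            have hc : List.count true (true :: bs) = List.count true bs + 1 := by simp
            rw [hc]
            push_cast
            rcases h2 with h2 | h2 <;> omega
          · rw [hmask]; simp
      · rintro (h | ⟨bs', hlen, h1, h2, rfl⟩)
        · exact Or.inl (Or.inl h)
        · rcases bs' with _ | ⟨b0, bs⟩
          · simp at hlen
          · cases b0 with
            | false =>
              refine Or.inl (Or.inr ⟨bs, by simpa using hlen, ?_, ?_, ?_⟩)
              · simpa using h1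
              · simpa using h2
              · rw [hmask]; simp
            | true =>
              refine Or.inr ⟨bs, by simpa using hlen, Or.inl rfl, ?_, ?_⟩
              · left
                have hc : List.count true (true :: bs) = List.count true bs + 1 := by simp
                rw [hc] at h2
                push_cast at h2 ⊢
                rcases h2 with h2 | h2
                · omega
                · exact h2.elim
              · rw [hmask]; simp
    · simp only [pvGoB, if_neg hb]
      rw [ih]
      constructor
      · rintro (h | ⟨bs, hlen, h1, h2, rfl⟩)
        · exact Or.inl h
        · refine Or.inr ⟨false :: bs, by simp [hlen], ?_, ?_, ?_⟩
          · simpa using h1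
          · simpa using h2
          · rw [hmask]; simp
      · rintro (h | ⟨bs', hlen, h1, h2, rfl⟩)
        · exact Or.inl h
        · rcases bs' with _ | ⟨b0, bs⟩
          · simp at hlen
          · cases b0 with
            | false =>
              refine Or.inr ⟨bs, by simpa using hlen, ?_, ?_, ?_⟩
              · simpa using h1
              · simpa using h2
              · rw [hmask]; simp
            | true =>
              exfalso
              have hc : List.count true (true :: bs) = List.count true bs + 1 := by simp
              rw [hc] at h2
              push_cast at h2
              rcases h2 with h2 | h2
              · omega
              · exact h2.elim

theorem pv_nodup_goB (rest : List Char) (b : Int) (used : Bool) (acc : List Char)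
    (out : PySem.Set String) (h : out.Nodup) : (pvGoB rest b used acc out).Nodup := by
  induction rest generalizing b used acc out with
  | nil =>
    unfold pvGoB
    split
    · exact PySem.Set.nodup_add _ _ h
    · exact h
  | cons c rs ih =>
    unfold pvGoB
    split
    · exact ih _ _ _ _ (ih _ _ _ _ h)
    · exact ih _ _ _ _ h

theorem pv_mem_B_iff_Q (cs : List Char) (k : Int) (t : String) :
    t ∈ pvGoB cs k false [] ([] : PySem.Set String) ↔ pvQ cs k t := by
  rw [pv_mem_goB]
  unfold pvQ
  constructor
  · rintro (h | ⟨bs, hlen, (h1 | h1), h2, rfl⟩)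
    · simp at h
    · simp at h1
    · refine ⟨bs, hlen, h1, h2.resolve_right (by omega), by simp⟩
  · rintro ⟨bs, hlen, h1, h2, rfl⟩
    exact Or.inr ⟨bs, hlen, Or.inr h1, Or.inl h2, by simp⟩

-- ===== VERDICT (by name: the statement is the Claim_ definition above) =====
theorem get_all_rel_fingerprints_spec : Claim_equal_get_all_rel_fingerprints := by
  intro s k _ _
  unfold Spec_get_all_rel_fingerprints get_all_rel_fingerprints get_all_rel_fingerprints_alt
  apply PySem.List.sorted_eq_sorted_of_perm _ _ _ (fun _ _ h => h)
  refine (List.perm_ext_iff_of_nodup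
      (pv_nodup_foldl2 _ _ _ _ List.nodup_nil)
      (pv_nodup_goB _ _ _ _ _ List.nodup_nil)).mpr ?_
  intro t
  rw [pv_mem_foldl2, pv_mem_B_iff_Q, ← pv_relA_iff_Q]
  simp
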